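-- pv_equiv track=rewrite | github.com/Cef0PT/pathfinder-item-shop | item_generator.py | sort_by_aura_strength
-- ===== SOURCE A (Python) =====
-- def sort_by_aura_strength(item_list: list):
--     sort_index = 0
--     faint, moderate, strong = [], [], []
--     for item in item_list:
--         if item["AuraStrength"] == "faint":
--             faint.append(item)
--         elif item["AuraStrength"] == "moderate":
--             moderate.append(item)
--         elif item["AuraStrength"] == "strong":
--             strong.append(item)
--         else:
--             sort_index += 1
--     print_str = f"There were {sort_index} items without feasible aura strength."
--     return faint, moderate, strong, print_str
-- ===== SOURCE B (Python) =====
-- def sort_by_aura_strength(item_list: list):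
--     faint = [item for item in item_list if item["AuraStrength"] == "faint"]
--     moderate = [item for item in item_list if item["AuraStrength"] == "moderate"]
--     strong = [item for item in item_list if item["AuraStrength"] == "strong"]
--     sort_index = len(item_list) - len(faint) - len(moderate) - len(strong)
--     print_str = f"There were {sort_index} items without feasible aura strength."
--     return faint, moderate, strong, print_str
-- ===== Notes on version B (the rewrite author's own statement) =====
-- stated objective: simpler
-- what changed: Replaces the single if/elif/else accumulator loop with three independent filtering comprehensions and derives the not-matching count arithmetically from the lengths.
import Mathlib
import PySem

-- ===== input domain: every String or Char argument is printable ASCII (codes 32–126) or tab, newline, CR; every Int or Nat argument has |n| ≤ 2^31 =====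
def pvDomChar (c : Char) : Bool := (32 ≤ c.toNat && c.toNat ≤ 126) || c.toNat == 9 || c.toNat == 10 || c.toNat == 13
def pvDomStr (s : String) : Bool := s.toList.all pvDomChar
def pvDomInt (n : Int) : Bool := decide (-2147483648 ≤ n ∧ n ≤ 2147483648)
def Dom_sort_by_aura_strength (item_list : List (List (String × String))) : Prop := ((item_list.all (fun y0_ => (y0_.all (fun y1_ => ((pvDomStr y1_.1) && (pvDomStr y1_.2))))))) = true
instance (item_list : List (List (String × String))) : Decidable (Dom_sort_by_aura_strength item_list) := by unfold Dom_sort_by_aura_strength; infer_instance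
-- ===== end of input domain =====

-- B replaces A's single if/elif/else accumulator loop by three independent filters plus length
-- arithmetic for the not-matching count; objective: simpler (same asymptotic cost).

-- item["AuraStrength"]: first-match lookup; exact wherever the key is present (Pre_ guarantees it;
-- on a missing key Python raises KeyError, excluded by Pre_).
def pvAura (item : List (String × String)) : String :=
  ((PySem.Dict.mk item).get? "AuraStrength").getD ""

-- ===== PORT A =====
def sort_by_aura_strength (item_list : List (List (String × String))) : (List (List (String × String))) × (List (List (String × String))) × (List (List (String × String))) × String :=
  let r : Int × List (List (String × String)) × List (List (String × String)) × List (List (String × String)) :=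
    item_list.foldl (fun st item =>
      if pvAura item = "faint" then (st.1, st.2.1 ++ [item], st.2.2.1, st.2.2.2)
      else if pvAura item = "moderate" then (st.1, st.2.1, st.2.2.1 ++ [item], st.2.2.2)
      else if pvAura item = "strong" then (st.1, st.2.1, st.2.2.1, st.2.2.2 ++ [item])
      else (st.1 + 1, st.2.1, st.2.2.1, st.2.2.2)) (0, [], [], [])
  (r.2.1, r.2.2.1, r.2.2.2, "There were " ++ PySem.Int.toStr r.1 ++ " items without feasible aura strength.")

-- ===== PORT B =====
def sort_by_aura_strength_alt (item_list : List (List (String × String))) : (List (List (String × String))) × (List (List (String × String))) × (List (List (String × String))) × String :=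
  let faint := item_list.filter (fun item => decide (pvAura item = "faint"))
  let moderate := item_list.filter (fun item => decide (pvAura item = "moderate"))
  let strong := item_list.filter (fun item => decide (pvAura item = "strong"))
  let sort_index : Int := (item_list.length : Int) - faint.length - moderate.length - strong.length
  (faint, moderate, strong, "There were " ++ PySem.Int.toStr sort_index ++ " items without feasible aura strength.")

-- ===== PRECONDITION & SPEC =====
-- Pre_: every item has the key "AuraStrength"; on a missing key Python's item["AuraStrength"] raises KeyError.
def Pre_sort_by_aura_strength (item_list : List (List (String × String))) : Prop :=
  (item_list.all (fun item => ((PySem.Dict.mk item).get? "AuraStrength").isSome)) = true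
instance (item_list : List (List (String × String))) : Decidable (Pre_sort_by_aura_strength item_list) := by unfold Pre_sort_by_aura_strength; infer_instance
def pvWitness_sort_by_aura_strength : (List (List (String × String))) :=
  [[("AuraStrength", "faint")], [("AuraStrength", "weird")]]

def Spec_sort_by_aura_strength (item_list : List (List (String × String))) (out : (List (List (String × String))) × (List (List (String × String))) × (List (List (String × String))) × String) : Prop := out = sort_by_aura_strength_alt item_list
instance (item_list : List (List (String × String))) (out : (List (List (String × String))) × (List (List (String × String))) × (List (List (String × String))) × String) : Decidable (Spec_sort_by_aura_strength item_list out) := by unfold Spec_sort_by_aura_strength; infer_instance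

-- ===== CLAIM (what is proved, stated in full; the proofs are below) =====
def Claim_equal_sort_by_aura_strength : Prop := ∀ (item_list : List (List (String × String))), Dom_sort_by_aura_strength item_list → Pre_sort_by_aura_strength item_list → Spec_sort_by_aura_strength item_list (sort_by_aura_strength item_list)

-- ===== LEMMAS AND PROOFS =====

-- A's loop, run from any starting state, appends the three filters and adds the count of the rest.
lemma pv_loop_eq (l : List (List (String × String))) (si : Int)
    (f m s : List (List (String × String))) :
    l.foldl (fun st item =>
      if pvAura item = "faint" then (st.1, st.2.1 ++ [item], st.2.2.1, st.2.2.2)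
      else if pvAura item = "moderate" then (st.1, st.2.1, st.2.2.1 ++ [item], st.2.2.2)
      else if pvAura item = "strong" then (st.1, st.2.1, st.2.2.1, st.2.2.2 ++ [item])
      else (st.1 + 1, st.2.1, st.2.2.1, st.2.2.2)) (si, f, m, s)
    = (si + ((l.filter (fun item => decide (¬ pvAura item = "faint" ∧ ¬ pvAura item = "moderate" ∧ ¬ pvAura item = "strong"))).length : Int),
       f ++ l.filter (fun item => decide (pvAura item = "faint")),
       m ++ l.filter (fun item => decide (pvAura item = "moderate")),
       s ++ l.filter (fun item => decide (pvAura item = "strong"))) := by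
  induction l generalizing si f m s with
  | nil => simp
  | cons a t ih =>
    simp only [List.foldl_cons, List.filter_cons]
    by_cases h1 : pvAura a = "faint"
    · rw [if_pos h1, ih]; simp [h1]
    · by_cases h2 : pvAura a = "moderate"
      · rw [if_neg h1, if_pos h2, ih]; simp [h1, h2]
      · by_cases h3 : pvAura a = "strong"
        · rw [if_neg h1, if_neg h2, if_pos h3, ih]; simp [h1, h2, h3]
        · rw [if_neg h1, if_neg h2, if_neg h3, ih]; simp [h1, h2, h3]; omega

-- the four filters partition the list, so the "other" count is the length difference
lemma pv_count_eq (l : List (List (String × String))) :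
    ((l.filter (fun item => decide (¬ pvAura item = "faint" ∧ ¬ pvAura item = "moderate" ∧ ¬ pvAura item = "strong"))).length : Int)
    = (l.length : Int)
      - (l.filter (fun item => decide (pvAura item = "faint"))).length
      - (l.filter (fun item => decide (pvAura item = "moderate"))).length
      - (l.filter (fun item => decide (pvAura item = "strong"))).length := by
  induction l with
  | nil => simp
  | cons a t ih =>
    simp only [List.filter_cons]
    by_cases h1 : pvAura a = "faint"
    · rw [if_neg (by simp [h1]), if_pos (by simp [h1]), if_neg (by simp [h1]), if_neg (by simp [h1])]
      simp only [List.length_cons]; push_cast; omega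
    · by_cases h2 : pvAura a = "moderate"
      · rw [if_neg (by simp [h2]), if_neg (by simp [h1]), if_pos (by simp [h2]), if_neg (by simp [h2])]
        simp only [List.length_cons]; push_cast; omega
      · by_cases h3 : pvAura a = "strong"
        · rw [if_neg (by simp [h3]), if_neg (by simp [h1]), if_neg (by simp [h2]), if_pos (by simp [h3])]
          simp only [List.length_cons]; push_cast; omega
        · rw [if_pos (by simp [h1, h2, h3]), if_neg (by simp [h1]), if_neg (by simp [h2]), if_neg (by simp [h3])]
          simp only [List.length_cons]; push_cast; omega

-- ===== VERDICT (by name: the statement is the Claim_ definition above) =====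
theorem sort_by_aura_strength_spec : Claim_equal_sort_by_aura_strength := by
  intro item_list _ _
  show _ = _
  simp only [sort_by_aura_strength, sort_by_aura_strength_alt, pv_loop_eq, pv_count_eq]
  simp
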